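-- pv_equiv track=rewrite | github.com/AdavidGuevara/Taller_1 | Puntos/Numeros_Mersenne.py | numeros_mersenne
-- ===== SOURCE A (Python) =====
-- import math
--
-- def evaluar_primo(numero):
--     primo = False
--     for i in range(2, int(math.sqrt(numero)) + 1):
--         if numero % i == 0:
--             primo = True
--             break
--     return primo
--
-- def numeros_mersenne(rango):
--     mersenne_lista = []
--     contador = 0
--     for i in range(2, rango):
--         if not evaluar_primo(i):
--             mersenne = (2**i)-1
--             mersenne_lista.append(mersenne)
--             contador += 1
--     return mersenne_lista, contador
-- ===== SOURCE B (Python) =====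
-- def numeros_mersenne(rango):
--     # Incremental trial division by previously found primes only (stop once p*p > i),
--     # instead of A's per-number scan over all integers up to sqrt(i).
--     primes = []
--     for i in range(2, rango):
--         is_prime = True
--         for p in primes:
--             if p * p > i:
--                 break
--             if i % p == 0:
--                 is_prime = False
--                 break
--         if is_prime:
--             primes.append(i)
--     return [(1 << p) - 1 for p in primes], len(primes)
-- ===== Notes on version B (the rewrite author's own statement) =====
-- stated objective: alternative
-- what changed: B maintains the list of primes found so far and trial-divides each candidate only by those primes while p*p <= i (instead of A's helper scanning every integer up to sqrt(i)), then builds the Mersenne list and count in one final map; fewer divisions, but total cost is dominated by constructing the huge Mersenne integers, so no timed speed-up is claimed.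
import Mathlib
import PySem

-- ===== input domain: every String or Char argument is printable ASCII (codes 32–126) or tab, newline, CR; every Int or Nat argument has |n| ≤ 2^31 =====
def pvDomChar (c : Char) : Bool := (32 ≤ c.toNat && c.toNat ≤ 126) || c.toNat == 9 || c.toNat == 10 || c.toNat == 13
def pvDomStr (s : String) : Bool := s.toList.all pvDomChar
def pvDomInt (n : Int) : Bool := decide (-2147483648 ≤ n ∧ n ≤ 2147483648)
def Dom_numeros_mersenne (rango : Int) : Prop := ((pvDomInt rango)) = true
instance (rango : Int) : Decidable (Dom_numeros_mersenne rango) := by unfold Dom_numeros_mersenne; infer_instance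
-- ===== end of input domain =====

-- B replaces A's per-number trial division over all integers up to sqrt(i) by incremental
-- trial division by the primes found so far (stopping once p*p > i); alternative algorithm,
-- no speed claim (output construction dominates).


-- ===== PORT A =====
-- the 'for i in range(...): if numero % i == 0: primo = True; break' loop of evaluar_primo
def evalLoop (numero : Int) : List Int → Bool
  | [] => false
  | d :: ds => if PySem.Int.mod numero d = 0 then true else evalLoop numero ds

-- int(math.sqrt(numero)) = Nat.sqrt numero.toNat: exact on the domain (0 ≤ numero ≤ 2^31,
-- where the double sqrt rounds to the integer square root); only called with numero ≥ 2
def evaluar_primo (numero : Int) : Bool :=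
  evalLoop numero (PySem.List.pyRange 2 ((Nat.sqrt numero.toNat : Int) + 1) 1)

def numeros_mersenne (rango : Int) : List Int × Int :=
  (PySem.List.pyRange 2 rango 1).foldl
    (fun st i =>
      if !(evaluar_primo i) then (st.1 ++ [2 ^ i.toNat - 1], st.2 + 1) else st)
    ([], 0)

-- ===== PORT B =====
-- B's inner loop over the accumulated primes, with both breaks
def bTest (i : Int) : List Int → Bool
  | [] => true
  | p :: ps =>
    if p * p > i then true
    else if PySem.Int.mod i p = 0 then false
    else bTest i ps

-- B's outer loop accumulating the primes below rango
def bSieve (rango : Int) : List Int :=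
  (PySem.List.pyRange 2 rango 1).foldl
    (fun primes i => if bTest i primes then primes ++ [i] else primes) []

-- (1 << p) - 1 = 2^p - 1; p ≥ 2 in every element of bSieve
def numeros_mersenne_alt (rango : Int) : List Int × Int :=
  ((bSieve rango).map (fun p => 2 ^ p.toNat - 1), (bSieve rango).length)

-- ===== PRECONDITION & SPEC =====
def Spec_numeros_mersenne (rango : Int) (out : List Int × Int) : Prop := out = numeros_mersenne_alt rango
instance (rango : Int) (out : List Int × Int) : Decidable (Spec_numeros_mersenne rango out) := by unfold Spec_numeros_mersenne; infer_instance

-- ===== CLAIM (what is proved, stated in full; the proofs are below) =====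
def Claim_equal_numeros_mersenne : Prop := ∀ (rango : Int), Dom_numeros_mersenne rango → Spec_numeros_mersenne rango (numeros_mersenne rango)

-- ===== LEMMAS AND PROOFS =====

lemma evalLoop_eq_true (numero : Int) (L : List Int) :
    evalLoop numero L = true ↔ ∃ d ∈ L, PySem.Int.mod numero d = 0 := by
  induction L with
  | nil => simp [evalLoop]
  | cons d ds ih =>
    simp only [evalLoop]
    split_ifs with h
    · simp [h]
    · simp [ih, h]

-- A's test returns false exactly on primes (for 2 ≤ i)
lemma evaluar_primo_false_iff (i : Int) (hi : 2 ≤ i) :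
    evaluar_primo i = false ↔ Nat.Prime i.toNat := by
  have h2 : 2 ≤ i.toNat := by omega
  have hnn : (0:Int) ≤ i := by omega
  rw [Nat.prime_def_le_sqrt]
  constructor
  · intro h
    refine ⟨h2, fun m hm hms hdvd => ?_⟩
    have : evalLoop i (PySem.List.pyRange 2 ((Nat.sqrt i.toNat : Int) + 1) 1) = true := by
      rw [evalLoop_eq_true]
      have hms' : (m : Int) ≤ (Nat.sqrt i.toNat : Int) := by exact_mod_cast hms
      refine ⟨(m : Int), ?_, ?_⟩
      · rw [PySem.List.mem_pyRange_one]
        exact ⟨by exact_mod_cast hm, by omega⟩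
      · rw [PySem.Int.mod_eq_zero_iff_dvd]
        have : (m : Int) ∣ (i.toNat : Int) := Int.natCast_dvd_natCast.mpr hdvd
        rwa [Int.toNat_of_nonneg hnn] at this
    simp [evaluar_primo, this] at h
  · intro ⟨_, hnd⟩
    by_contra h
    have h' : evaluar_primo i = true := by
      cases hb : evaluar_primo i with
      | false => exact absurd hb h
      | true => rfl
    rw [evaluar_primo, evalLoop_eq_true] at h'
    obtain ⟨d, hdmem, hdmod⟩ := h'
    rw [PySem.List.mem_pyRange_one] at hdmem
    rw [PySem.Int.mod_eq_zero_iff_dvd] at hdmod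
    have hd2 : 2 ≤ d.toNat := by omega
    have hds : d.toNat ≤ Nat.sqrt i.toNat := by omega
    refine hnd d.toNat hd2 hds ?_
    have : (d.toNat : Int) ∣ (i.toNat : Int) := by
      rw [Int.toNat_of_nonneg (by omega : (0:Int) ≤ d), Int.toNat_of_nonneg hnn]
      exact hdmod
    exact_mod_cast this

-- B's inner loop, characterised: given a sorted nonnegative prime pool,
-- true ↔ no pool element with p*p ≤ i divides i
lemma bTest_true_iff (i : Int) (P : List Int) (hsort : P.Pairwise (· ≤ ·))
    (hnn : ∀ p ∈ P, 0 ≤ p) :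
    bTest i P = true ↔ ∀ p ∈ P, p * p ≤ i → ¬ p ∣ i := by
  induction P with
  | nil => simp [bTest]
  | cons p ps ih =>
    have hsort' := (List.pairwise_cons.mp hsort).2
    have hle := (List.pairwise_cons.mp hsort).1
    have hp0 : 0 ≤ p := hnn p (by simp)
    simp only [bTest]
    split_ifs with h1 h2
    · simp only [true_iff]
      intro q hq hqq
      rcases List.mem_cons.mp hq with rfl | hq
      · omega
      · have hpq : p ≤ q := hle q hq
        have : p * p ≤ q * q := mul_le_mul hpq hpq hp0 (by omega)
        omega
    · rw [PySem.Int.mod_eq_zero_iff_dvd] at h2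
      simp only [false_iff]
      intro h
      exact h p (by simp) (by omega) h2
    · rw [ih hsort' (fun q hq => hnn q (by simp [hq]))]
      constructor
      · intro h q hq hqq
        rcases List.mem_cons.mp hq with rfl | hq'
        · rw [← PySem.Int.mod_eq_zero_iff_dvd]; exact h2
        · exact h q hq' hqq
      · intro h q hq hqq
        exact h q (by simp [hq]) hqq

-- B's test equals primality given the pool is exactly the primes below i
lemma bTest_eq_prime (i : Int) (P : List Int) (hi : 2 ≤ i)
    (hsort : P.Pairwise (· ≤ ·))
    (hmem : ∀ p ∈ P, 2 ≤ p ∧ p < i ∧ Nat.Prime p.toNat)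
    (hcomp : ∀ q : Int, 2 ≤ q → q < i → Nat.Prime q.toNat → q ∈ P) :
    bTest i P = true ↔ Nat.Prime i.toNat := by
  rw [bTest_true_iff i P hsort (fun p hp => by have := (hmem p hp).1; omega)]
  constructor
  · intro h
    by_contra hnp
    set m := Nat.minFac i.toNat with hm
    have hne1 : i.toNat ≠ 1 := by omega
    have hmp : Nat.Prime m := Nat.minFac_prime hne1
    have hmd : m ∣ i.toNat := Nat.minFac_dvd _
    have hmsq : m * m ≤ i.toNat := by
      have := Nat.minFac_sq_le_self (by omega : 0 < i.toNat) hnp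
      simpa [pow_two] using this
    have hm2 : 2 ≤ m := hmp.two_le
    have hmlt : (m : Int) < i := by
      have h1 : m < m * m := by nlinarith
      have h2 : m < i.toNat := by omega
      omega
    have hmP : (m : Int) ∈ P := by
      refine hcomp (m : Int) (by exact_mod_cast hm2) hmlt ?_
      simpa using hmp
    have hmmi : (m : Int) * m ≤ i := by
      have h' : ((m * m : Nat) : Int) ≤ ((i.toNat : Nat) : Int) := by exact_mod_cast hmsq
      push_cast at h'
      rwa [Int.toNat_of_nonneg (by omega : (0:Int) ≤ i)] at h'
    refine h (m : Int) hmP hmmi ?_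
    have : (m : Int) ∣ (i.toNat : Int) := Int.natCast_dvd_natCast.mpr hmd
    rwa [Int.toNat_of_nonneg (by omega : (0:Int) ≤ i)] at this
  · intro hp q hq hqq hdvd
    obtain ⟨hq2, hqlt, hqp⟩ := hmem q hq
    have hdn : q.toNat ∣ i.toNat := by
      have : (q.toNat : Int) ∣ (i.toNat : Int) := by
        rw [Int.toNat_of_nonneg (by omega : (0:Int) ≤ q), Int.toNat_of_nonneg (by omega : (0:Int) ≤ i)]
        exact hdvd
      exact_mod_cast this
    rcases (Nat.Prime.eq_one_or_self_of_dvd hp q.toNat hdn) with h1 | h1 <;> omega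

def SieveInv (P : List Int) (r : Int) : Prop :=
  P.Pairwise (· ≤ ·) ∧
  (∀ p ∈ P, 2 ≤ p ∧ p < r ∧ Nat.Prime p.toNat) ∧
  (∀ q : Int, 2 ≤ q → q < r → Nat.Prime q.toNat → q ∈ P)

lemma main_invariant (r : Int) :
    SieveInv (bSieve r) r ∧
      numeros_mersenne r = ((bSieve r).map (fun p => 2 ^ p.toNat - 1), ((bSieve r).length : Int)) := by
  rcases (by omega : r ≤ 2 ∨ 2 < r) with hr | hr
  · have hnil : PySem.List.pyRange 2 r 1 = [] := PySem.List.pyRange_one_eq_nil (by omega)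
    constructor
    · refine ⟨?_, ?_, ?_⟩ <;> simp [bSieve, hnil]
      intro q h1 h2; omega
    · simp [numeros_mersenne, bSieve, hnil]
  · have h2r : (2:Int) ≤ r := by omega
    induction r, h2r using Int.le_induction with
    | base => omega
    | succ n hn ih =>
      have hsplit : PySem.List.pyRange 2 (n + 1) 1 = PySem.List.pyRange 2 n 1 ++ [n] :=
        PySem.List.pyRange_one_succ_right (by omega)
      rcases (by omega : n ≤ 2 ∨ 2 < n) with hn2 | hn2
      · -- n = 2 : both sides computed directly
        have hn2' : n = 2 := by omega
        subst hn2'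
        rw [show (2:Int)+1 = 3 from by norm_num]
        have hr2 : PySem.List.pyRange 2 3 1 = [2] := by
          rw [show (3:Int) = 2+1 from by norm_num, PySem.List.pyRange_one_singleton]
        have hprime2 : Nat.Prime ((2:Int).toNat) := by decide
        have ha2 : evaluar_primo 2 = false := (evaluar_primo_false_iff 2 (by omega)).mpr hprime2
        have hbs : bSieve 3 = [2] := by simp [bSieve, hr2, bTest]
        refine ⟨⟨?_, ?_, ?_⟩, ?_⟩
        · simp [hbs]
        · intro p hp; rw [hbs] at hp; simp at hp; subst hp
          exact ⟨by omega, by omega, hprime2⟩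
        · intro q h1' h2' _; rw [hbs]; simp; omega
        · rw [hbs]; simp [numeros_mersenne, hr2, ha2]
      · obtain ⟨⟨hsort, hmem, hcomp⟩, heq⟩ := ih hn2
        have htest : bTest n (bSieve n) = true ↔ Nat.Prime n.toNat :=
          bTest_eq_prime n (bSieve n) (by omega) hsort hmem hcomp
        have hatest : evaluar_primo n = false ↔ Nat.Prime n.toNat :=
          evaluar_primo_false_iff n (by omega)
        have hbs : bSieve (n + 1) =
            if bTest n (bSieve n) then bSieve n ++ [n] else bSieve n := by
          simp [bSieve, hsplit, List.foldl_append]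
        have hA : numeros_mersenne (n + 1) =
            (if !(evaluar_primo n) then
              ((numeros_mersenne n).1 ++ [2 ^ n.toNat - 1], (numeros_mersenne n).2 + 1)
             else numeros_mersenne n) := by
          simp [numeros_mersenne, hsplit, List.foldl_append]
        by_cases hp : Nat.Prime n.toNat
        · have hb : bTest n (bSieve n) = true := htest.mpr hp
          have ha : evaluar_primo n = false := hatest.mpr hp
          have hbs' : bSieve (n + 1) = bSieve n ++ [n] := by rw [hbs, hb]; simp
          refine ⟨⟨?_, ?_, ?_⟩, ?_⟩
          · rw [hbs']
            refine List.pairwise_append.mpr ⟨hsort, by simp, ?_⟩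
            intro p hp' q hq'; simp at hq'; subst hq'
            have := (hmem p hp').2.1; omega
          · intro p hp'
            rw [hbs'] at hp'
            rcases List.mem_append.mp hp' with h | h
            · obtain ⟨a, b, c⟩ := hmem p h; exact ⟨a, by omega, c⟩
            · simp at h; subst h; exact ⟨by omega, by omega, hp⟩
          · intro q h1' h2' hq
            rw [hbs']
            rcases (by omega : q < n ∨ n ≤ q) with hlt | hge
            · exact List.mem_append.mpr (Or.inl (hcomp q h1' hlt hq))
            · have : q = n := by omega
              subst this; simp
          · rw [hA, ha, heq, hbs']
            simp
        · have hb : bTest n (bSieve n) = false := by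
            cases h : bTest n (bSieve n) with
            | true => exact absurd (htest.mp h) hp
            | false => rfl
          have ha : evaluar_primo n = true := by
            cases h : evaluar_primo n with
            | false => exact absurd (hatest.mp h) hp
            | true => rfl
          have hbs' : bSieve (n + 1) = bSieve n := by rw [hbs, hb]; simp
          refine ⟨⟨?_, ?_, ?_⟩, ?_⟩
          · rw [hbs']; exact hsort
          · intro p hp'; rw [hbs'] at hp'
            obtain ⟨a, b, c⟩ := hmem p hp'; exact ⟨a, by omega, c⟩
          · intro q h1' h2' hq
            rw [hbs']
            rcases (by omega : q < n ∨ n ≤ q) with hlt | hge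
            · exact hcomp q h1' hlt hq
            · have : q = n := by omega
              subst this
              exact absurd hq hp
          · rw [hA, ha, heq, hbs']
            simp

-- ===== VERDICT (by name: the statement is the Claim_ definition above) =====
theorem numeros_mersenne_spec : Claim_equal_numeros_mersenne := by
  intro rango _
  unfold Spec_numeros_mersenne numeros_mersenne_alt
  exact (main_invariant rango).2
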